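-- pv_equiv track=rewrite | github.com/FrostedLemonade4/AXS-Demos | scripts/Chapter_info.py | filter_starting_from_alpha
-- ===== SOURCE A (Python) =====
-- def filter_starting_from_alpha(lines):
--     """
--     Filters lines to process from the first occurrence of the word 'Alpha'.
--     """
--     start_processing = False
--     filtered_lines = []
--
--     for line in lines:
--         if "Alpha" in line:
--             start_processing = True  # Start processing from this point
--         if start_processing:
--             filtered_lines.append(line)
--
--     return filtered_lines
-- ===== SOURCE B (Python) =====
-- def filter_starting_from_alpha(lines):
--     """
--     Filters lines to process from the first occurrence of the word 'Alpha'.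
--     """
--     lines = list(lines)
--     for i, line in enumerate(lines):
--         if "Alpha" in line:
--             return lines[i:]
--     return []
-- ===== Notes on version B (the rewrite author's own statement) =====
-- stated objective: simpler
-- what changed: Instead of threading a boolean flag and appending element-by-element, B locates the index of the first line containing 'Alpha' with enumerate and returns the suffix lines[i:] in one slice.
import Mathlib
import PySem

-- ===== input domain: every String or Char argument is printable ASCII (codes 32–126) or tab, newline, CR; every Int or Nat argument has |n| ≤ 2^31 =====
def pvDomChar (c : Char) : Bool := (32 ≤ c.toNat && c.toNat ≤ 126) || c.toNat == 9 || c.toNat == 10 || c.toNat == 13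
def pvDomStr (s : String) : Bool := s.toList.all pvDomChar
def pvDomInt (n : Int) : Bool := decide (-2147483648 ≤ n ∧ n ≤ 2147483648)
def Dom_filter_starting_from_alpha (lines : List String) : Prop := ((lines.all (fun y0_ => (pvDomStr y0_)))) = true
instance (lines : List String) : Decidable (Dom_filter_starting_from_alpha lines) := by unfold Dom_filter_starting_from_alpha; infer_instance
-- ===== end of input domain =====

-- ===== PORT A =====
-- B replaces A's boolean flag + element-by-element append with an index search and one suffix slice (objective: simpler).
def pvAGo (lines : List String) (start : Bool) (acc : List String) : List String :=
  match lines with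
  | [] => acc
  | line :: rest =>
      let start' := if PySem.Str.isIn "Alpha" line then true else start
      let acc' := if start' then acc ++ [line] else acc
      pvAGo rest start' acc'

def filter_starting_from_alpha (lines : List String) : List String :=
  pvAGo lines false []

-- ===== PORT B =====
-- 'for i, line in enumerate(lines): if "Alpha" in line: return ...' — the index search
def pvFindAlpha (lines : List String) (i : Nat) : Option Nat :=
  match lines with
  | [] => none
  | line :: rest =>
      if PySem.Str.isIn "Alpha" line then some i else pvFindAlpha rest (i + 1)

def filter_starting_from_alpha_alt (lines : List String) : List String :=
  match pvFindAlpha lines 0 with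
  | some i => PySem.List.slice lines (some (i : Int)) none
  | none => []

-- ===== PRECONDITION & SPEC =====
def Spec_filter_starting_from_alpha (lines : List String) (out : List String) : Prop := out = filter_starting_from_alpha_alt lines
instance (lines : List String) (out : List String) : Decidable (Spec_filter_starting_from_alpha lines out) := by unfold Spec_filter_starting_from_alpha; infer_instance

-- ===== CLAIM (what is proved, stated in full; the proofs are below) =====
def Claim_equal_filter_starting_from_alpha : Prop := ∀ (lines : List String), Dom_filter_starting_from_alpha lines → Spec_filter_starting_from_alpha lines (filter_starting_from_alpha lines)

-- ===== LEMMAS AND PROOFS =====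

-- Once the flag is set, A appends every remaining line.
theorem pvAGo_true (lines : List String) (acc : List String) :
    pvAGo lines true acc = acc ++ lines := by
  induction lines generalizing acc with
  | nil => simp [pvAGo]
  | cons l t ih => simp [pvAGo, ih]

theorem pvFindAlpha_shift (lines : List String) (i : Nat) :
    pvFindAlpha lines (i + 1) = Option.map (· + 1) (pvFindAlpha lines i) := by
  induction lines generalizing i with
  | nil => simp [pvFindAlpha]
  | cons l t ih =>
      simp only [pvFindAlpha]
      split
      · rfl
      · rw [ih, ih, Option.map_map]

-- B computes the suffix starting at the first matching line.
theorem alt_cons (l : String) (t : List String) :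
    filter_starting_from_alpha_alt (l :: t) =
      if PySem.Str.isIn "Alpha" l then l :: t else filter_starting_from_alpha_alt t := by
  by_cases h : PySem.Chars.isIn ['A','l','p','h','a'] l.toList
  · simp [filter_starting_from_alpha_alt, pvFindAlpha, PySem.Str.isIn, h]
  · unfold filter_starting_from_alpha_alt
    rw [show pvFindAlpha (l :: t) 0 = pvFindAlpha t (0 + 1) by
      simp [pvFindAlpha, PySem.Str.isIn, h]]
    rw [pvFindAlpha_shift]
    cases hf : pvFindAlpha t 0 with
    | none => simp [PySem.Str.isIn, h]
    | some i =>
        simp only [Option.map_some]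
        rw [PySem.List.slice_from_natCast, PySem.List.slice_from_natCast]
        simp
        exact fun hc => absurd hc h

theorem pvAGo_false (lines : List String) (acc : List String) :
    pvAGo lines false acc = acc ++ filter_starting_from_alpha_alt lines := by
  induction lines generalizing acc with
  | nil => simp [pvAGo, filter_starting_from_alpha_alt, pvFindAlpha]
  | cons l t ih =>
      rw [alt_cons]
      by_cases h : PySem.Chars.isIn ['A','l','p','h','a'] l.toList
      · simp [pvAGo, PySem.Str.isIn, h, pvAGo_true]
      · simp [pvAGo, PySem.Str.isIn, h, ih]

-- ===== VERDICT (by name: the statement is the Claim_ definition above) =====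
theorem filter_starting_from_alpha_spec : Claim_equal_filter_starting_from_alpha := by
  intro lines _
  unfold Spec_filter_starting_from_alpha filter_starting_from_alpha
  simp [pvAGo_false]
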